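-- pv_equiv track=rewrite | github.com/bonyubking/BaekJoon_2025_Bon | BaekJoon2024/19852.py | find_almost_friends
-- ===== SOURCE A (Python) =====
-- def find_friends(a,b):
--     a1 = set(a)
--     b1 = set(b)
--     if a1 == b1:
--         return True
--     else:
--         return False
--
-- def find_almost_friends(a,b):
--     for i in range(len(a)-1):
--         if not(i == 0 and a[i] == 1):
--             a[i] -= 1
--             a[i+1] += 1
--             if find_friends(a,b):
--                 return True
--             a[i] += 1
--             a[i+1] -= 1
--
--         a[i] += 1
--         a[i+1] -= 1
--
--         if find_friends(a,b):
--             return True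
--
--         a[i] -= 1
--         a[i+1] += 1
-- ===== SOURCE B (Python) =====
-- # B: O(n) re-implementation. Precompute target set and a value-count dict for a,
-- # maintain the number of mismatched distinct values ("bad") incrementally per
-- # adjacent +-1 transfer instead of rebuilding set(a) for every candidate.
-- # (A mutates a in place and can leave it mutated when returning True; B never
-- # mutates a - the equivalence claimed is about the return value only.)
-- def find_almost_friends(a, b):
--     b1 = set(b)
--     cnt = {}
--     for v in a:
--         cnt[v] = cnt.get(v, 0) + 1
--     bad = 0
--     for v in cnt:
--         if v not in b1:
--             bad += 1
--     for v in b1: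
--         if v not in cnt:
--             bad += 1
--
--     def adj(v, d):
--         nonlocal bad
--         c = cnt.get(v, 0)
--         if (c > 0) != (v in b1):
--             bad -= 1
--         c = c + d
--         cnt[v] = c
--         if (c > 0) != (v in b1):
--             bad += 1
--
--     def check(r1, a1, r2, a2):
--         adj(r1, -1); adj(a1, 1); adj(r2, -1); adj(a2, 1)
--         ok = (bad == 0)
--         adj(a2, -1); adj(r2, 1); adj(a1, -1); adj(r1, 1)
--         return ok
--
--     for i in range(len(a) - 1):
--         x, y = a[i], a[i + 1]
--         if not (i == 0 and x == 1):
--             if check(x, x - 1, y, y + 1):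
--                 return True
--         if check(x, x + 1, y, y - 1):
--             return True
-- ===== Notes on version B (the rewrite author's own statement) =====
-- stated objective: faster
-- what changed: Instead of mutating a and rebuilding set(a) to compare with set(b) for every candidate adjacent transfer, B precomputes set(b) and a value-count dict of a and maintains the number of mismatched distinct values incrementally (O(1) per candidate move), so each candidate test drops from O(n) to O(1).
import Mathlib
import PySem

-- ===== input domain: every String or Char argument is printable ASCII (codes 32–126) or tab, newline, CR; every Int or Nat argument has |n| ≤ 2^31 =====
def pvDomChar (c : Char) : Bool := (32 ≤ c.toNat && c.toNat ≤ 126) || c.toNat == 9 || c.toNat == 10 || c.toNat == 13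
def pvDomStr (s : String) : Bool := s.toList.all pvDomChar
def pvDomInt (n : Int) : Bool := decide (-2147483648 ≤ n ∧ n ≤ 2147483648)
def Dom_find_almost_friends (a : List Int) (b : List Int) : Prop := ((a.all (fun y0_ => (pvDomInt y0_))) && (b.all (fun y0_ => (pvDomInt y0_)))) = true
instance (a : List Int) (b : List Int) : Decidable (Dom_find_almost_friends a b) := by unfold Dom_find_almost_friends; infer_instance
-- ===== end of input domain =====

-- B replaces A's per-candidate set(a) == set(b) rebuild by a precomputed count dict and an
-- incrementally maintained number of mismatched distinct values; equivalence is about the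
-- RETURN value only (Python A mutates `a` transiently and leaves it mutated when it returns True).

-- ===== PORT A =====
def find_friends (a : List Int) (b : List Int) : Bool :=
  let a1 := PySem.Set.ofList a
  let b1 := PySem.Set.ofList b
  if PySem.Set.equal a1 b1 then true else false

-- the for-loop of A over the remaining indices of range(len(a)-1); `a` is the mutated list.
-- All indices i, i+1 are in range (0 ≤ i < len a - 1), so the total pyGetD/pySetD are exact here.
def faLoopA (b : List Int) : List Int → List Int → Option Bool
  | [], _ => none
  | i :: is, a =>
    -- shared tail of the loop body: a[i] += 1; a[i+1] -= 1; check; undo; next iteration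
    let step2 : List Int → Option Bool := fun a' =>
      let t1 := PySem.List.pySetD a' i (PySem.List.pyGetD a' i 0 + 1)
      let t2 := PySem.List.pySetD t1 (i+1) (PySem.List.pyGetD t1 (i+1) 0 - 1)
      if find_friends t2 b then some true
      else
        let t3 := PySem.List.pySetD t2 i (PySem.List.pyGetD t2 i 0 - 1)
        let t4 := PySem.List.pySetD t3 (i+1) (PySem.List.pyGetD t3 (i+1) 0 + 1)
        faLoopA b is t4
    if !(i == 0 && PySem.List.pyGetD a i 0 == 1) then
      let s1 := PySem.List.pySetD a i (PySem.List.pyGetD a i 0 - 1)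
      let s2 := PySem.List.pySetD s1 (i+1) (PySem.List.pyGetD s1 (i+1) 0 + 1)
      if find_friends s2 b then some true
      else
        let s3 := PySem.List.pySetD s2 i (PySem.List.pyGetD s2 i 0 + 1)
        let s4 := PySem.List.pySetD s3 (i+1) (PySem.List.pyGetD s3 (i+1) 0 - 1)
        step2 s4
    else step2 a

def find_almost_friends (a : List Int) (b : List Int) : Option Bool :=
  faLoopA b (PySem.List.pyRange 0 (PySem.List.len a - 1) 1) a

-- ===== PORT B =====
-- adj(v, d) of Source B: state is (cnt, bad)
def faAdj (b1 : List Int) (st : PySem.Dict Int Int × Int) (v : Int) (d : Int) :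
    PySem.Dict Int Int × Int :=
  let c := st.1.getD v 0
  let bad := if (decide (0 < c)) != PySem.Set.contains b1 v then st.2 - 1 else st.2
  let c2 := c + d
  let cnt := st.1.insert v c2
  let bad2 := if (decide (0 < c2)) != PySem.Set.contains b1 v then bad + 1 else bad
  (cnt, bad2)

-- check(r1, a1, r2, a2) of Source B: returns (ok, final state)
def faCheck (b1 : List Int) (st : PySem.Dict Int Int × Int) (r1 a1 r2 a2 : Int) :
    Bool × (PySem.Dict Int Int × Int) :=
  let st1 := faAdj b1 (faAdj b1 (faAdj b1 (faAdj b1 st r1 (-1)) a1 1) r2 (-1)) a2 1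
  let ok := st1.2 == 0
  let st2 := faAdj b1 (faAdj b1 (faAdj b1 (faAdj b1 st1 a2 (-1)) r2 1) a1 (-1)) r1 1
  (ok, st2)

def faLoopB (a : List Int) (b1 : List Int) : List Int → PySem.Dict Int Int × Int → Option Bool
  | [], _ => none
  | i :: is, st =>
    let x := PySem.List.pyGetD a i 0
    let y := PySem.List.pyGetD a (i+1) 0
    let k1 := if !(i == 0 && x == 1) then faCheck b1 st x (x-1) y (y+1) else (false, st)
    if k1.1 then some true
    else
      let k2 := faCheck b1 k1.2 x (x+1) y (y-1)
      if k2.1 then some true else faLoopB a b1 is k2.2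

def find_almost_friends_alt (a : List Int) (b : List Int) : Option Bool :=
  let b1 := PySem.Set.ofList b
  let cnt := a.foldl (fun d v => d.insert v (d.getD v 0 + 1)) PySem.Dict.empty
  let bad := cnt.keys.foldl (fun n v => if !(PySem.Set.contains b1 v) then n + 1 else n) (0 : Int)
  let bad2 := b1.foldl (fun n v => if !(cnt.contains v) then n + 1 else n) bad
  faLoopB a b1 (PySem.List.pyRange 0 (PySem.List.len a - 1) 1) (cnt, bad2)

-- ===== PRECONDITION & SPEC =====
def Spec_find_almost_friends (a : List Int) (b : List Int) (out : Option Bool) : Prop := out = find_almost_friends_alt a b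
instance (a : List Int) (b : List Int) (out : Option Bool) : Decidable (Spec_find_almost_friends a b out) := by unfold Spec_find_almost_friends; infer_instance

-- ===== CLAIM (what is proved, stated in full; the proofs are below) =====
def Claim_equal_find_almost_friends : Prop := ∀ (a : List Int) (b : List Int), Dom_find_almost_friends a b → Spec_find_almost_friends a b (find_almost_friends a b)

-- ===== LEMMAS AND PROOFS =====

-- mismatch of a single value v between the counts `cnt` and the target set b1
def faMism (b1 : List Int) (cnt : PySem.Dict Int Int) (v : Int) : Bool :=
  (decide (0 < cnt.getD v 0)) != PySem.Set.contains b1 v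

-- the (finite) set of mismatched values
def faMSet (b1 : List Int) (cnt : PySem.Dict Int Int) : Finset Int :=
  (cnt.keys ++ b1).toFinset.filter (fun v => faMism b1 cnt v = true)

theorem faMism_support (b1 : List Int) (cnt : PySem.Dict Int Int) (v : Int)
    (h : faMism b1 cnt v = true) : v ∈ cnt.keys ∨ v ∈ b1 := by
  by_cases hb : v ∈ b1
  · exact Or.inr hb
  · left
    by_cases hk : v ∈ cnt.keys
    · exact hk
    · exfalso
      have h0 : cnt.get? v = none := (PySem.Dict.get?_eq_none_iff_not_mem_keys cnt v).2 hk
      have hz : cnt.getD v 0 = 0 := by simp [PySem.Dict.getD, h0]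
      simp [faMism, hz] at h
      exact hb h

theorem mem_faMSet (b1 : List Int) (cnt : PySem.Dict Int Int) (v : Int) :
    v ∈ faMSet b1 cnt ↔ faMism b1 cnt v = true := by
  constructor
  · intro hv; exact (Finset.mem_filter.1 hv).2
  · intro hv
    refine Finset.mem_filter.2 ⟨?_, hv⟩
    rcases faMism_support b1 cnt v hv with h | h <;>
      simp [List.mem_toFinset, h]

theorem faMSet_congr (b1 : List Int) (cnt cnt' : PySem.Dict Int Int)
    (h : ∀ v, cnt.getD v 0 = cnt'.getD v 0) : faMSet b1 cnt = faMSet b1 cnt' := by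
  apply Finset.ext; intro v
  rw [mem_faMSet, mem_faMSet]
  simp [faMism, h v]

theorem faAdj_getD (b1 : List Int) (st : PySem.Dict Int Int × Int) (v d w : Int) :
    (faAdj b1 st v d).1.getD w 0 = st.1.getD w 0 + (if w = v then d else 0) := by
  simp only [faAdj, PySem.Dict.getD_insert]
  split_ifs with hw
  · subst hw; ring
  · ring

theorem faMSet_card_split (b1 : List Int) (cnt : PySem.Dict Int Int) (v : Int) :
    (faMSet b1 cnt).card =
      ((faMSet b1 cnt).erase v).card + (if faMism b1 cnt v = true then 1 else 0) := by
  by_cases hm : faMism b1 cnt v = true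
  · have hv : v ∈ faMSet b1 cnt := (mem_faMSet _ _ _).2 hm
    rw [Finset.card_erase_of_mem hv, if_pos hm]
    have h1 : 1 ≤ (faMSet b1 cnt).card := Finset.card_pos.2 ⟨v, hv⟩
    omega
  · rw [Finset.erase_eq_self.2 (fun hv => hm ((mem_faMSet _ _ _).1 hv)), if_neg hm]
    omega

theorem faMSet_erase_eq (b1 : List Int) (cnt cnt' : PySem.Dict Int Int) (v : Int)
    (h : ∀ w, w ≠ v → cnt'.getD w 0 = cnt.getD w 0) :
    (faMSet b1 cnt').erase v = (faMSet b1 cnt).erase v := by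
  apply Finset.ext; intro w
  simp only [Finset.mem_erase, mem_faMSet]
  constructor
  · rintro ⟨hne, hm⟩; exact ⟨hne, by simpa [faMism, h w hne] using hm⟩
  · rintro ⟨hne, hm⟩; exact ⟨hne, by simpa [faMism, h w hne] using hm⟩

theorem faAdj_bad (b1 : List Int) (st : PySem.Dict Int Int × Int) (v d : Int)
    (h : st.2 = ((faMSet b1 st.1).card : Int)) :
    (faAdj b1 st v d).2 = ((faMSet b1 (faAdj b1 st v d).1).card : Int) := by
  have hW : ∀ w, w ≠ v → (faAdj b1 st v d).1.getD w 0 = st.1.getD w 0 := by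
    intro w hw; rw [faAdj_getD]; simp [hw]
  have hV : (faAdj b1 st v d).1.getD v 0 = st.1.getD v 0 + d := by
    rw [faAdj_getD]; simp
  have hE : ((faMSet b1 (faAdj b1 st v d).1).erase v).card
      = ((faMSet b1 st.1).erase v).card := by
    rw [faMSet_erase_eq b1 st.1 (faAdj b1 st v d).1 v hW]
  have h1 := faMSet_card_split b1 st.1 v
  have h2 := faMSet_card_split b1 (faAdj b1 st v d).1 v
  have hm1 : ((decide (0 < st.1.getD v 0)) != PySem.Set.contains b1 v) = faMism b1 st.1 v := rfl
  have hm2 : ((decide (0 < st.1.getD v 0 + d)) != PySem.Set.contains b1 v)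
      = faMism b1 (faAdj b1 st v d).1 v := by rw [faMism, hV]
  conv_lhs => simp only [faAdj]
  rw [hm1, hm2]
  split_ifs with hA hB hB <;> simp [hA, hB] at h1 h2 <;> omega

-- count of v in l.set n w
theorem count_set_int (l : List Int) (n : Nat) (h : n < l.length) (w v : Int) :
    (((l.set n w).count v : Int)) =
      (l.count v : Int) - (if v = l[n] then 1 else 0) + (if v = w then 1 else 0) := by
  have hdec : l = l.take n ++ l[n] :: l.drop (n+1) := by
    conv_lhs => rw [← List.take_append_drop n l]
    rw [← List.getElem_cons_drop h]
  have hc : (List.count v l : Int)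
      = List.count v (l.take n) + List.count v (l.drop (n+1)) + (if v = l[n] then 1 else 0) := by
    conv_lhs => rw [hdec]
    simp only [List.count_append, List.count_cons, beq_iff_eq]
    by_cases h1 : v = l[n] <;> simp [h1, eq_comm] <;> push_cast <;> ring
  rw [List.set_eq_take_cons_drop w h, hc]
  simp only [List.count_append, List.count_cons, beq_iff_eq]
  by_cases h1 : v = l[n] <;> by_cases h2 : v = w <;> simp [h1, h2, eq_comm] <;> push_cast <;> omega

theorem find_friends_iff (a b : List Int) :
    find_friends a b = true ↔ ∀ v, (v ∈ a ↔ v ∈ b) := by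
  simp only [find_friends]
  split_ifs with h
  · simp only [true_iff]
    intro v
    have := (PySem.Set.equal_iff _ _).1 h v
    simpa [PySem.Set.mem_ofList] using this
  · simp only [false_iff]
    intro hall
    exact h ((PySem.Set.equal_iff _ _).2 (fun v => by simpa [PySem.Set.mem_ofList] using hall v))

theorem faMism_false_iff (b1 : List Int) (cnt : PySem.Dict Int Int) (v : Int) :
    (¬ faMism b1 cnt v = true) ↔ (0 < cnt.getD v 0 ↔ v ∈ b1) := by
  rw [Bool.not_eq_true, faMism, bne_eq_false_iff_eq]
  cases hcon : PySem.Set.contains b1 v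
  · have hv : v ∉ b1 := fun hm => by
      rw [(PySem.Set.contains_iff b1 v).2 hm] at hcon; cases hcon
    simp [hv]
  · have hv : v ∈ b1 := (PySem.Set.contains_iff b1 v).1 hcon
    simp [hv]

-- what faCheck computes, given the bad-count invariant
theorem faCheck_spec (b1 : List Int) (st : PySem.Dict Int Int × Int) (r1 a1 r2 a2 : Int)
    (h : st.2 = ((faMSet b1 st.1).card : Int)) :
    (∀ w, (faCheck b1 st r1 a1 r2 a2).2.1.getD w 0 = st.1.getD w 0) ∧
    (faCheck b1 st r1 a1 r2 a2).2.2 = st.2 ∧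
    ((faCheck b1 st r1 a1 r2 a2).1 = true ↔
      ∀ v, (0 < st.1.getD v 0
              - (if v = r1 then 1 else 0) + (if v = a1 then 1 else 0)
              - (if v = r2 then 1 else 0) + (if v = a2 then 1 else 0) ↔ v ∈ b1)) := by
  simp only [faCheck]
  have i1 := faAdj_bad b1 st r1 (-1) h
  have i2 := faAdj_bad b1 _ a1 1 i1
  have i3 := faAdj_bad b1 _ r2 (-1) i2
  have i4 := faAdj_bad b1 _ a2 1 i3
  have i5 := faAdj_bad b1 _ a2 (-1) i4
  have i6 := faAdj_bad b1 _ r2 1 i5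
  have i7 := faAdj_bad b1 _ a1 (-1) i6
  have i8 := faAdj_bad b1 _ r1 1 i7
  refine ⟨?_, ?_, ?_⟩
  · intro w
    simp only [faAdj_getD]
    split_ifs <;> omega
  · have gAll : ∀ w,
        (faAdj b1 (faAdj b1 (faAdj b1 (faAdj b1 (faAdj b1 (faAdj b1 (faAdj b1 (faAdj b1 st r1 (-1)) a1 1) r2 (-1)) a2 1) a2 (-1)) r2 1) a1 (-1)) r1 1).1.getD w 0
          = st.1.getD w 0 := by
      intro w
      simp only [faAdj_getD]
      split_ifs <;> omega
    rw [i8, faMSet_congr b1 _ st.1 gAll, ← h]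
  · rw [i4]
    have hcard : ((((faMSet b1 (faAdj b1 (faAdj b1 (faAdj b1 (faAdj b1 st r1 (-1)) a1 1) r2 (-1)) a2 1).1).card : Int) == 0) = true)
        ↔ (faMSet b1 (faAdj b1 (faAdj b1 (faAdj b1 (faAdj b1 st r1 (-1)) a1 1) r2 (-1)) a2 1).1) = ∅ := by
      rw [beq_iff_eq]
      simp [Finset.card_eq_zero]
    rw [hcard, Finset.eq_empty_iff_forall_notMem]
    apply forall_congr'
    intro v
    rw [mem_faMSet, faMism_false_iff]
    have hx : (faAdj b1 (faAdj b1 (faAdj b1 (faAdj b1 st r1 (-1)) a1 1) r2 (-1)) a2 1).1.getD v 0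
        = st.1.getD v 0 - (if v = r1 then 1 else 0) + (if v = a1 then 1 else 0)
            - (if v = r2 then 1 else 0) + (if v = a2 then 1 else 0) := by
      simp only [faAdj_getD]
      split_ifs <;> omega
    rw [hx]

theorem faCheck_keep (b1 : List Int) (st : PySem.Dict Int Int × Int) (r1 a1 r2 a2 : Int)
    (h : st.2 = ((faMSet b1 st.1).card : Int)) :
    (∀ w, (faCheck b1 st r1 a1 r2 a2).2.1.getD w 0 = st.1.getD w 0) ∧
    (faCheck b1 st r1 a1 r2 a2).2.2
      = ((faMSet b1 (faCheck b1 st r1 a1 r2 a2).2.1).card : Int) := by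
  obtain ⟨hgd, hbd, -⟩ := faCheck_spec b1 st r1 a1 r2 a2 h
  refine ⟨hgd, ?_⟩
  rw [hbd, h, faMSet_congr b1 st.1 (faCheck b1 st r1 a1 r2 a2).2.1 (fun v => (hgd v).symm)]

theorem set_restore (a : List Int) (k : Nat) (hk : k + 1 < a.length) (u1 u2 : Int) :
    (((a.set k u1).set (k+1) u2).set k (a[k]'(by omega))).set (k+1) (a[k+1]'hk) = a := by
  apply List.ext_getElem
  · simp
  · intro n hn1 hn2
    simp only [List.getElem_set]
    split_ifs <;> (try subst_vars) <;> first | rfl | omega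

theorem cand_eq (a b : List Int) (k : Nat) (hk : k + 1 < a.length)
    (st : PySem.Dict Int Int × Int)
    (hg : ∀ v, st.1.getD v 0 = (a.count v : Int))
    (hbad : st.2 = ((faMSet (PySem.Set.ofList b) st.1).card : Int)) (u1 u2 : Int) :
    find_friends ((a.set k u1).set (k+1) u2) b
      = (faCheck (PySem.Set.ofList b) st (a[k]'(by omega)) u1 (a[k+1]'hk) u2).1 := by
  obtain ⟨-, -, hok⟩ := faCheck_spec (PySem.Set.ofList b) st (a[k]'(by omega)) u1 (a[k+1]'hk) u2 hbad
  rw [Bool.eq_iff_iff, hok, find_friends_iff]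
  apply forall_congr'
  intro v
  have hcount : (((a.set k u1).set (k+1) u2).count v : Int)
      = (a.count v : Int) - (if v = a[k]'(by omega) then 1 else 0) + (if v = u1 then 1 else 0)
        - (if v = a[k+1]'hk then 1 else 0) + (if v = u2 then 1 else 0) := by
    rw [count_set_int _ (k+1) (by simpa using hk) u2 v, count_set_int a k (by omega) u1 v]
    rw [show ((a.set k u1)[k+1]'(by simpa using hk)) = a[k+1]'hk from
      List.getElem_set_ne (by omega) _]
    try ring
  have hmem : v ∈ ((a.set k u1).set (k+1) u2) ↔
      0 < (a.count v : Int) - (if v = a[k]'(by omega) then 1 else 0) + (if v = u1 then 1 else 0)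
        - (if v = a[k+1]'hk then 1 else 0) + (if v = u2 then 1 else 0) := by
    rw [← hcount, Int.natCast_pos, List.count_pos_iff]
  rw [hg v, PySem.Set.mem_ofList, hmem]

theorem faLoop_eq (a b : List Int) (is : List Int)
    (hidx : ∀ i ∈ is, 0 ≤ i ∧ i.toNat + 1 < a.length)
    (st : PySem.Dict Int Int × Int)
    (hg : ∀ v, st.1.getD v 0 = (a.count v : Int))
    (hbad : st.2 = ((faMSet (PySem.Set.ofList b) st.1).card : Int)) :
    faLoopA b is a = faLoopB a (PySem.Set.ofList b) is st := by
  induction is generalizing st with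
  | nil => rfl
  | cons i is ih =>
    obtain ⟨hi0, hilen⟩ := hidx i List.mem_cons_self
    have hidx' : ∀ j ∈ is, 0 ≤ j ∧ j.toNat + 1 < a.length := fun j hj =>
      hidx j (List.mem_cons_of_mem _ hj)
    have hik : i = ((i.toNat : Nat) : Int) := (Int.toNat_of_nonneg hi0).symm
    have hk1 : i.toNat + 1 < a.length := hilen
    have hkl : i.toNat < a.length := by omega
    simp only [faLoopA, faLoopB]
    rw [hik, show ((i.toNat : Int) + 1) = ((i.toNat + 1 : Nat) : Int) by push_cast; ring]
    have hne1 : ¬ ((i.toNat : Nat) = i.toNat + 1) := by omega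
    have hne2 : ¬ (i.toNat + 1 = (i.toNat : Nat)) := by omega
    simp only [PySem.List.pySetD_natCast, PySem.List.pyGetD_natCast,
      List.getD_eq_getElem?_getD, List.getElem?_set, List.length_set, hne1, hne2,
      if_false, if_true, List.getElem?_eq_getElem, hkl, hk1, Option.getD_some,
      (show i.toNat < a.length from hkl), ite_false, ite_true, List.getElem_set,
      sub_add_cancel, add_sub_cancel_right]
    simp only [set_restore a i.toNat hk1]
    by_cases hgrd : (!((i.toNat : Int) == 0 && a[i.toNat]'hkl == 1)) = true
    · simp only [if_pos hgrd]
      rw [cand_eq a b i.toNat hk1 st hg hbad]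
      obtain ⟨hk2, hb2⟩ := faCheck_keep (PySem.Set.ofList b) st (a[i.toNat]'(by omega))
        ((a[i.toNat]'(by omega)) - 1) (a[i.toNat+1]'hk1) ((a[i.toNat+1]'hk1) + 1) hbad
      have hg2 : ∀ v, (faCheck (PySem.Set.ofList b) st (a[i.toNat]'(by omega))
          ((a[i.toNat]'(by omega)) - 1) (a[i.toNat+1]'hk1) ((a[i.toNat+1]'hk1) + 1)).2.1.getD v 0
          = (a.count v : Int) := fun v => (hk2 v).trans (hg v)
      rw [cand_eq a b i.toNat hk1 _ hg2 hb2]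
      obtain ⟨hk3, hb3⟩ := faCheck_keep (PySem.Set.ofList b) _ (a[i.toNat]'(by omega))
        ((a[i.toNat]'(by omega)) + 1) (a[i.toNat+1]'hk1) ((a[i.toNat+1]'hk1) - 1) hb2
      have hg3 := fun v => (hk3 v).trans (hg2 v)
      rw [ih hidx' _ hg3 hb3]
    · simp only [if_neg hgrd, Bool.false_eq_true, if_false]
      rw [cand_eq a b i.toNat hk1 st hg hbad]
      obtain ⟨hk2, hb2⟩ := faCheck_keep (PySem.Set.ofList b) st (a[i.toNat]'(by omega))
        ((a[i.toNat]'(by omega)) + 1) (a[i.toNat+1]'hk1) ((a[i.toNat+1]'hk1) - 1) hbad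
      have hg2 := fun v => (hk2 v).trans (hg v)
      rw [ih hidx' _ hg2 hb2]

theorem faCnt_getD (a : List Int) (v : Int) :
    (a.foldl (fun d v => d.insert v (d.getD v 0 + 1)) (PySem.Dict.empty : PySem.Dict Int Int)).getD v 0
      = (a.count v : Int) := by
  rw [PySem.Dict.getD_foldl_insert_add_one]
  simp

theorem faCnt_keys (a : List Int) :
    (a.foldl (fun d v => d.insert v (d.getD v 0 + 1)) (PySem.Dict.empty : PySem.Dict Int Int)).keys
      = PySem.Set.ofList a := by
  rw [PySem.Dict.keys_foldl_insert]
  simp [PySem.Set.update_nil_left]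

theorem faMism_init_iff (a b : List Int) (v : Int) :
    faMism (PySem.Set.ofList b) (a.foldl (fun d v => d.insert v (d.getD v 0 + 1)) (PySem.Dict.empty : PySem.Dict Int Int)) v = true
      ↔ ((v ∈ a ∧ v ∉ b) ∨ (v ∈ b ∧ v ∉ a)) := by
  rw [faMism, bne_iff_ne, faCnt_getD]
  have hpos : (0 < ((a.count v : Nat) : Int)) ↔ v ∈ a := by
    rw [Int.natCast_pos, List.count_pos_iff]
  have hcon : PySem.Set.contains (PySem.Set.ofList b) v = true ↔ v ∈ b := by
    rw [PySem.Set.contains_iff, PySem.Set.mem_ofList]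
  have hcb : PySem.Set.contains (PySem.Set.ofList b) v = decide (v ∈ b) := by
    by_cases hb : v ∈ b
    · rw [hcon.2 hb]; simp [hb]
    · rw [Bool.eq_false_iff.2 (fun h => hb (hcon.1 h))]; simp [hb]
  have hda : decide (0 < ((a.count v : Nat) : Int)) = decide (v ∈ a) :=
    decide_eq_decide.2 hpos
  rw [hcb, hda]
  by_cases ha : v ∈ a <;> by_cases hb : v ∈ b <;> simp [ha, hb]

theorem init_bad (a b : List Int) :
    (PySem.Set.ofList b).foldl
        (fun n v => if !((a.foldl (fun d v => d.insert v (d.getD v 0 + 1)) (PySem.Dict.empty : PySem.Dict Int Int)).contains v) then n + 1 else n)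
        ((a.foldl (fun d v => d.insert v (d.getD v 0 + 1)) (PySem.Dict.empty : PySem.Dict Int Int)).keys.foldl
          (fun n v => if !(PySem.Set.contains (PySem.Set.ofList b) v) then n + 1 else n) (0 : Int))
      = ((faMSet (PySem.Set.ofList b)
            (a.foldl (fun d v => d.insert v (d.getD v 0 + 1)) (PySem.Dict.empty : PySem.Dict Int Int))).card : Int) := by
  rw [PySem.List.foldl_if_add_one, PySem.List.foldl_if_add_one]
  have hXnd : ((a.foldl (fun d v => d.insert v (d.getD v 0 + 1)) (PySem.Dict.empty : PySem.Dict Int Int)).keys.filter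
      (fun v => !(PySem.Set.contains (PySem.Set.ofList b) v))).Nodup := by
    rw [faCnt_keys]; exact (PySem.Set.nodup_ofList a).filter _
  have hYnd : ((PySem.Set.ofList b).filter
      (fun v => !((a.foldl (fun d v => d.insert v (d.getD v 0 + 1)) (PySem.Dict.empty : PySem.Dict Int Int)).contains v))).Nodup :=
    (PySem.Set.nodup_ofList b).filter _
  have hcontains : ∀ v, ((a.foldl (fun d v => d.insert v (d.getD v 0 + 1)) (PySem.Dict.empty : PySem.Dict Int Int)).contains v = true) ↔ v ∈ a := by
    intro v
    rw [PySem.Dict.contains_eq_decide_mem_keys, faCnt_keys]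
    simp [PySem.Set.mem_ofList]
  have hsplit : faMSet (PySem.Set.ofList b) (a.foldl (fun d v => d.insert v (d.getD v 0 + 1)) (PySem.Dict.empty : PySem.Dict Int Int))
      = ((a.foldl (fun d v => d.insert v (d.getD v 0 + 1)) (PySem.Dict.empty : PySem.Dict Int Int)).keys.filter
          (fun v => !(PySem.Set.contains (PySem.Set.ofList b) v))).toFinset
        ∪ ((PySem.Set.ofList b).filter
          (fun v => !((a.foldl (fun d v => d.insert v (d.getD v 0 + 1)) (PySem.Dict.empty : PySem.Dict Int Int)).contains v))).toFinset := by
    apply Finset.ext; intro v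
    rw [Finset.mem_union, mem_faMSet, faMism_init_iff]
    simp only [List.mem_toFinset, List.mem_filter, faCnt_keys, PySem.Set.mem_ofList,
      Bool.not_eq_eq_eq_not, Bool.not_true]
    constructor
    · rintro (⟨ha, hb⟩ | ⟨hb, ha⟩)
      · exact Or.inl ⟨ha, by simp [Bool.eq_false_iff, (PySem.Set.contains_iff (PySem.Set.ofList b) v), PySem.Set.mem_ofList, hb]⟩
      · exact Or.inr ⟨hb, by simp [Bool.eq_false_iff, hcontains v, ha]⟩
    · rintro (⟨ha, hb⟩ | ⟨hb, ha⟩)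
      · refine Or.inl ⟨ha, fun hvb => ?_⟩
        rw [(PySem.Set.contains_iff (PySem.Set.ofList b) v).2 ((PySem.Set.mem_ofList b v).2 hvb)] at hb
        cases hb
      · refine Or.inr ⟨hb, fun hva => ?_⟩
        rw [(hcontains v).2 hva] at ha
        cases ha
  have hdisj : Disjoint
      (((a.foldl (fun d v => d.insert v (d.getD v 0 + 1)) (PySem.Dict.empty : PySem.Dict Int Int)).keys.filter
        (fun v => !(PySem.Set.contains (PySem.Set.ofList b) v))).toFinset)
      (((PySem.Set.ofList b).filter
        (fun v => !((a.foldl (fun d v => d.insert v (d.getD v 0 + 1)) (PySem.Dict.empty : PySem.Dict Int Int)).contains v))).toFinset) := by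
    rw [Finset.disjoint_left]
    intro v hv hv'
    simp only [List.mem_toFinset, List.mem_filter] at hv hv'
    rw [Bool.not_eq_eq_eq_not, Bool.not_true, Bool.eq_false_iff] at hv hv'
    exact hv.2 ((PySem.Set.contains_iff _ v).2 hv'.1)
  rw [hsplit, Finset.card_union_of_disjoint hdisj,
    List.toFinset_card_of_nodup hXnd, List.toFinset_card_of_nodup hYnd,
    ← List.countP_eq_length_filter, ← List.countP_eq_length_filter]
  push_cast
  ring

-- ===== VERDICT (by name: the statement is the Claim_ definition above) =====
theorem find_almost_friends_spec : Claim_equal_find_almost_friends := by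
  intro a b _
  show find_almost_friends a b = find_almost_friends_alt a b
  unfold find_almost_friends find_almost_friends_alt
  apply faLoop_eq
  · intro i hi
    rw [PySem.List.mem_pyRange_one, PySem.List.len_eq] at hi
    omega
  · exact fun v => faCnt_getD a v
  · exact init_bad a b
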